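-- pv_equiv track=rewrite | github.com/Alireza1044/stanford-cs224n | a1/a1.py | distinct_words
-- ===== SOURCE A (Python) =====
-- def distinct_words(corpus):
--     """ Determine a list of distinct words for the corpus.
--         Params:
--             corpus (list of list of strings): corpus of documents
--         Return:
--             corpus_words (list of strings): sorted list of distinct words across the corpus
--             num_corpus_words (integer): number of distinct words across the corpus
--     """
--     corpus_words = []
--     num_corpus_words = -1
--
--     # ------------------
--     # Write your implementation here.
--
--     corpus_words = set([word for sentence in corpus for word in sentence])
--     corpus_words = list(corpus_words)
--     corpus_words = sorted(corpus_words)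
--     num_corpus_words = len(corpus_words)
--     # ------------------
--
--     return corpus_words, num_corpus_words
-- ===== SOURCE B (Python) =====
-- def distinct_words(corpus):
--     """ Determine a list of distinct words for the corpus (sort-then-dedup-adjacent, no hash set). """
--     words = sorted([word for sentence in corpus for word in sentence])
--     corpus_words = []
--     prev = None
--     for w in words:
--         if prev is None or w != prev:
--             corpus_words.append(w)
--         prev = w
--     return corpus_words, len(corpus_words)
-- ===== Notes on version B (the rewrite author's own statement) =====
-- stated objective: alternative
-- what changed: Replaces the hash-set-then-sort strategy by sorting the full flattened word list (duplicates included) and removing adjacent equal words in one pass with a 'previous' marker, using no set at all.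
import Mathlib
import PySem

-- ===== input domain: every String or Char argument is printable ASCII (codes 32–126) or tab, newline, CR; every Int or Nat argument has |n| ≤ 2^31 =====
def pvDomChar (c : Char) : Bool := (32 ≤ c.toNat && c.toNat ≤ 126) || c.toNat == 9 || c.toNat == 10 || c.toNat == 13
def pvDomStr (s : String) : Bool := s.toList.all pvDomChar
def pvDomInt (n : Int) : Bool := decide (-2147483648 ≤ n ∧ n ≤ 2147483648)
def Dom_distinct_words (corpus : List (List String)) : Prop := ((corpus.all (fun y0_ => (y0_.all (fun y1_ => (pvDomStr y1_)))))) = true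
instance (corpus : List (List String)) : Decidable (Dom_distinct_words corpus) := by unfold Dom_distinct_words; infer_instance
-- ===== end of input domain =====

-- ===== PORT A =====
-- B replaces A's set-then-sort by sort-all-then-dedup-adjacent (alternative algorithm, same cost).
def distinct_words (corpus : List (List String)) : List String × Int :=
  let corpus_words := PySem.Set.ofList (corpus.flatMap (fun sentence => sentence))
  let corpus_words := PySem.List.sorted corpus_words (fun x => x) false
  (corpus_words, (corpus_words.length : Int))

-- ===== PORT B =====
def distinct_words_alt (corpus : List (List String)) : List String × Int :=
  let words := PySem.List.sorted (corpus.flatMap (fun sentence => sentence)) (fun x => x) false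
  let st := words.foldl (fun (st : List String × Option String) w =>
      ((if st.2 = none ∨ st.2 ≠ some w then st.1 ++ [w] else st.1), some w)) ([], none)
  (st.1, (st.1.length : Int))

-- ===== PRECONDITION & SPEC =====
def Spec_distinct_words (corpus : List (List String)) (out : List String × Int) : Prop := out = distinct_words_alt corpus
instance (corpus : List (List String)) (out : List String × Int) : Decidable (Spec_distinct_words corpus out) := by unfold Spec_distinct_words; infer_instance

-- ===== CLAIM (what is proved, stated in full; the proofs are below) =====
def Claim_equal_distinct_words : Prop := ∀ (corpus : List (List String)), Dom_distinct_words corpus → Spec_distinct_words corpus (distinct_words corpus)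

-- ===== LEMMAS AND PROOFS =====

/-- The adjacent-dedup tail that B's loop computes after the first element:
keeps `y` iff it differs from the element right before it (`p` before the first). -/
def dedupTail : String → List String → List String
  | _, [] => []
  | p, y :: ys => if y = p then dedupTail y ys else y :: dedupTail y ys

def pvStep (st : List String × Option String) (w : String) : List String × Option String :=
  ((if st.2 = none ∨ st.2 ≠ some w then st.1 ++ [w] else st.1), some w)

lemma foldl_pvStep_some (ys : List String) : ∀ (acc : List String) (p : String),
    ys.foldl pvStep (acc, some p) = (acc ++ dedupTail p ys, some (ys.foldl (fun _ y => y) p)) := by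
  induction ys with
  | nil => intro acc p; simp [dedupTail]
  | cons y ys ih =>
    intro acc p
    by_cases h : y = p
    · subst h
      simp [List.foldl_cons, pvStep, dedupTail, ih]
    · have : some p ≠ some y := by simpa using Ne.symm h
      simp [List.foldl_cons, pvStep, this, dedupTail, h, ih]

/-- On a sorted run headed by `p`, `p :: dedupTail p ys` is strictly increasing and
has exactly the elements of `p :: ys`. -/
lemma dedupTail_key (ys : List String) : ∀ (p : String), (∀ y ∈ ys, p ≤ y) →
    ys.Pairwise (· ≤ ·) →
    (p :: dedupTail p ys).Pairwise (· < ·) ∧ (∀ x, x ∈ p :: dedupTail p ys ↔ x = p ∨ x ∈ ys) := by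
  induction ys with
  | nil => intro p _ _; simp [dedupTail]
  | cons y ys ih =>
    intro p hle hpw
    have hpy : p ≤ y := hle y (by simp)
    have hyys : ∀ z ∈ ys, y ≤ z := (List.pairwise_cons.mp hpw).1
    have hpwys : ys.Pairwise (· ≤ ·) := (List.pairwise_cons.mp hpw).2
    by_cases h : y = p
    · subst h
      obtain ⟨h1, h2⟩ := ih y hyys hpwys
      refine ⟨by simpa [dedupTail] using h1, ?_⟩
      intro x
      have := h2 x
      simp [dedupTail] at this ⊢
      tauto
    · obtain ⟨h1, h2⟩ := ih y hyys hpwys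
      have hplt : p < y := lt_of_le_of_ne hpy (Ne.symm h)
      refine ⟨?_, ?_⟩
      · rw [show (p :: dedupTail p (y :: ys)) = p :: y :: dedupTail y ys by simp [dedupTail, h]]
        refine List.pairwise_cons.mpr ⟨?_, h1⟩
        intro z hz
        rcases (h2 z).mp hz with rfl | hz'
        · exact hplt
        · exact lt_of_lt_of_le hplt (hyys z hz')
      · intro x
        have := h2 x
        simp [dedupTail, h] at this ⊢
        tauto

lemma distinct_lists_eq (corpus : List (List String)) :
    (distinct_words corpus).1 = (distinct_words_alt corpus).1 := by
  unfold distinct_words distinct_words_alt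
  set words := corpus.flatMap (fun sentence => sentence) with hwords
  cases hs : PySem.List.sorted words (fun x => x) false with
  | nil =>
    have hw : words = [] := (PySem.List.sorted_eq_nil_iff words (fun x => x) false).mp hs
    have h0 : PySem.List.sorted ([] : List String) (fun x => x) false = [] :=
      (PySem.List.sorted_eq_nil_iff [] (fun x => x) false).mpr rfl
    simp [hw, h0]
  | cons w ws =>
    have hperm : (w :: ws).Perm words := hs ▸ PySem.List.sorted_perm words (fun x => x) false
    have hpw : (w :: ws).Pairwise (fun a b => a ≤ b) := by
      have := PySem.List.sorted_pairwise (xs := words) (key := fun x => x)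
      rw [hs] at this; simpa using this
    have hwle : ∀ y ∈ ws, w ≤ y := (List.pairwise_cons.mp hpw).1
    have hpwws : ws.Pairwise (· ≤ ·) := (List.pairwise_cons.mp hpw).2
    obtain ⟨hlt, hmem⟩ := dedupTail_key ws w hwle hpwws
    -- B's loop: first step emits w, then dedupTail
    have hfold : (w :: ws).foldl pvStep ([], none)
        = (w :: dedupTail w ws, some (ws.foldl (fun _ y => y) w)) := by
      simp only [List.foldl_cons]
      have : pvStep ([], none) w = ([w], some w) := by simp [pvStep]
      rw [this, foldl_pvStep_some]
      simp
    -- A's list equals B's list: both strictly increasing rearrangements of the distinct words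
    have hAeq : PySem.List.sorted (PySem.Set.ofList words) (fun x => x) false
        = w :: dedupTail w ws := by
      apply PySem.List.sorted_eq_of_perm_of_pairwise_lt
      · -- Perm: both nodup with the same members
        have hnodupB : (w :: dedupTail w ws).Nodup :=
          hlt.imp (fun h => ne_of_lt h)
        have hnodupS : (PySem.Set.ofList words).Nodup := PySem.Set.nodup_ofList words
        rw [List.perm_ext_iff_of_nodup hnodupB hnodupS]
        intro x
        rw [hmem x, PySem.Set.mem_ofList]
        constructor
        · rintro (rfl | hx)
          · exact hperm.mem_iff.mp (by simp)
          · exact hperm.mem_iff.mp (by simp [hx])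
        · intro hx
          have : x ∈ w :: ws := hperm.mem_iff.mpr hx
          simpa using this
      · simpa using hlt
    show PySem.List.sorted (PySem.Set.ofList words) (fun x => x) false
        = ((w :: ws).foldl pvStep ([], none)).1
    rw [hfold, hAeq]

-- ===== VERDICT (by name: the statement is the Claim_ definition above) =====
theorem distinct_words_spec : Claim_equal_distinct_words := by
  intro corpus _
  unfold Spec_distinct_words
  have h1 := distinct_lists_eq corpus
  have h2 : distinct_words corpus
      = ((distinct_words corpus).1, ((distinct_words corpus).1.length : Int)) := by
    unfold distinct_words; rfl
  have h3 : distinct_words_alt corpus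
      = ((distinct_words_alt corpus).1, ((distinct_words_alt corpus).1.length : Int)) := by
    unfold distinct_words_alt; rfl
  rw [h2, h3, h1]
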